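-- pv_equiv track=rewrite | github.com/paiml/depyler | examples/text_processing_combined.py | find_palindromes
-- ===== SOURCE A (Python) =====
-- from typing import List, Dict, Tuple
--
-- def find_palindromes(words: List[str]) -> List[str]:
--     """Find palindrome words"""
--     palindromes: List[str] = []
--
--     for word in words:
--         # Reverse word
--         reversed_word: str = ""
--         for i in range(len(word) - 1, -1, -1):
--             reversed_word = reversed_word + word[i]
--
--         if word == reversed_word and len(word) > 1:
--             # Check if already in list
--             found: bool = False
--             for p in palindromes:
--                 if p == word:
--                     found = True
--                     break
--
--             if not found:
--                 palindromes.append(word)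
--
--     return palindromes
-- ===== SOURCE B (Python) =====
-- def find_palindromes(words):
--     """Find palindrome words"""
--     seen = set()
--     result = []
--     for word in words:
--         if len(word) > 1 and word not in seen:
--             i = 0
--             j = len(word) - 1
--             is_pal = True
--             while i < j:
--                 if word[i] != word[j]:
--                     is_pal = False
--                     break
--                 i += 1
--                 j -= 1
--             if is_pal:
--                 seen.add(word)
--                 result.append(word)
--     return result
-- ===== Notes on version B (the rewrite author's own statement) =====
-- stated objective: faster
-- what changed: Replaces A's reversed-string construction (quadratic per-word string concatenation) by an early-exit two-pointer palindrome scan, and A's linear rescan of the output list by a hash set checked before the palindrome test.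
import Mathlib
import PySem

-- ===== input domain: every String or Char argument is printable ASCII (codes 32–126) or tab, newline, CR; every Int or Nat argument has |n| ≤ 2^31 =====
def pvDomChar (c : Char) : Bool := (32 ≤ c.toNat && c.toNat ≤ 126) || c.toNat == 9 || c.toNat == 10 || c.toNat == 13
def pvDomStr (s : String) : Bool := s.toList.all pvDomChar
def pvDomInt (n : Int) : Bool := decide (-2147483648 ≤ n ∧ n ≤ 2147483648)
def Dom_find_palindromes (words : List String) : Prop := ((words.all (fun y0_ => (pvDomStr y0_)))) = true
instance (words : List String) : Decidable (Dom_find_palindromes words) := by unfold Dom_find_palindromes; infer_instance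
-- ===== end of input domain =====

-- B replaces A's reversed-string build and output-list rescan by an early-exit two-pointer
-- palindrome scan with a seen-set; measured faster (same return value, no mutation).


-- ===== PORT A =====
-- A's inner loop: reversed_word built char by char over range(len(word)-1, -1, -1);
-- string equality is compared on the code-point lists (String equality ↔ toList equality).
def pyRevA (word : String) : List Char :=
  (PySem.List.pyRange (PySem.List.len word.toList - 1) (-1) (-1)).foldl
    (fun acc i => acc ++ [PySem.List.pyGetD word.toList i ' ']) []

-- one iteration of A's outer for-loop
def stepA (palindromes : List String) (word : String) : List String :=
  let reversed_word := pyRevA word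
  if word.toList = reversed_word ∧ 1 < PySem.List.len word.toList then
    let found := palindromes.any (fun p => p == word)
    if found = false then palindromes ++ [word] else palindromes
  else palindromes

def find_palindromes (words : List String) : List String :=
  words.foldl stepA []

-- ===== PORT B =====
-- Source B's while loop with indices i, j; both indices stay in range (i < j < len),
-- so List.getD is exact for word[i] / word[j].
def twoPtr (cs : List Char) (i j : Nat) : Bool :=
  if h : i < j then
    if cs.getD i ' ' != cs.getD j ' ' then false
    else twoPtr cs (i + 1) (j - 1)
  else true
termination_by j - i

-- one iteration of Source B's for-loop over state (seen, result)
def stepB (st : PySem.Set String × List String) (word : String) : PySem.Set String × List String :=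
  if 1 < PySem.List.len word.toList ∧ PySem.Set.contains st.1 word = false then
    if twoPtr word.toList 0 (word.toList.length - 1) then
      (PySem.Set.add st.1 word, st.2 ++ [word])
    else st
  else st

def find_palindromes_alt (words : List String) : List String :=
  (words.foldl stepB ((PySem.Set.empty : PySem.Set String), ([] : List String))).2

-- ===== PRECONDITION & SPEC =====
def Spec_find_palindromes (words : List String) (out : List String) : Prop := out = find_palindromes_alt words
instance (words : List String) (out : List String) : Decidable (Spec_find_palindromes words out) := by unfold Spec_find_palindromes; infer_instance

-- ===== CLAIM (what is proved, stated in full; the proofs are below) =====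
def Claim_equal_find_palindromes : Prop := ∀ (words : List String), Dom_find_palindromes words → Spec_find_palindromes words (find_palindromes words)

-- ===== LEMMAS AND PROOFS =====

-- A's reversed_word loop produces the reversed character list
lemma pyRevA_eq (word : String) : pyRevA word = word.toList.reverse := by
  unfold pyRevA
  set cs := word.toList with hcs
  rw [PySem.List.pyRange_neg_one, List.foldl_map,
      PySem.List.foldl_append_singleton_eq_map]
  simp only [PySem.List.len_eq, List.nil_append]
  have hn : ((cs.length : Int) - 1 - (-1)).toNat = cs.length := by omega
  rw [hn]
  apply List.ext_getElem (by simp)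
  intro k h1 h2
  simp only [List.getElem_map, List.getElem_range, List.getElem_reverse]
  have hk : k < cs.length := by simpa using h1
  have hcast : (cs.length : Int) - 1 - (k : Int) = ((cs.length - 1 - k : Nat) : Int) := by omega
  rw [hcast, PySem.List.pyGetD_natCast]
  rw [List.getD_eq_getElem cs ' ' (by omega)]

-- the two-pointer loop checks exactly the pairs (k, i+j-k) with i ≤ k and 2k < i+j
lemma twoPtr_iff (cs : List Char) (m i j : Nat) (hm : j - i ≤ m) :
    twoPtr cs i j = true ↔
      ∀ k, i ≤ k → 2 * k < i + j → cs.getD k ' ' = cs.getD (i + j - k) ' ' := by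
  induction m generalizing i j with
  | zero =>
    have hij : ¬ i < j := by omega
    rw [twoPtr]
    simp only [hij, dif_neg, not_false_iff]
    constructor
    · intro _ k hk1 hk2; omega
    · intro _; trivial
  | succ m ih =>
    by_cases h : i < j
    · rw [twoPtr]
      simp only [h, dif_pos]
      by_cases hc : cs.getD i ' ' = cs.getD j ' '
      · have hne : (cs.getD i ' ' != cs.getD j ' ') = false := by rw [bne_eq_false_iff_eq]; exact hc
        rw [hne]
        simp only [Bool.false_eq_true, if_false]
        rw [ih (i + 1) (j - 1) (by omega)]
        constructor
        · intro H k hk1 hk2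
          rcases Nat.eq_or_lt_of_le hk1 with heq | hlt
          · subst heq
            have : i + j - i = j := by omega
            rw [this]; exact hc
          · have h1 : i + 1 ≤ k := hlt
            have h2 : 2 * k < (i + 1) + (j - 1) := by omega
            have h3 : (i + 1) + (j - 1) - k = i + j - k := by omega
            rw [← h3]; exact H k h1 h2
        · intro H k hk1 hk2
          have h3 : (i + 1) + (j - 1) - k = i + j - k := by omega
          rw [h3]; exact H k (by omega) (by omega)
      · have hne : (cs.getD i ' ' != cs.getD j ' ') = true := by rw [bne_iff_ne]; exact hc
        rw [hne]
        simp only [if_true, Bool.false_eq_true, false_iff, not_forall]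
        refine ⟨i, le_refl i, by omega, ?_⟩
        have : i + j - i = j := by omega
        rw [this]; exact hc
    · rw [twoPtr]
      simp only [h, dif_neg, not_false_iff]
      constructor
      · intro _ k hk1 hk2; omega
      · intro _; trivial

-- the two-pointer scan from (0, len-1) decides palindromicity
lemma twoPtr_palindrome (cs : List Char) :
    twoPtr cs 0 (cs.length - 1) = true ↔ cs.reverse = cs := by
  rw [twoPtr_iff cs cs.length 0 (cs.length - 1) (by omega)]
  constructor
  · intro H
    have key : ∀ a, a < cs.length → cs.getD a ' ' = cs.getD (cs.length - 1 - a) ' ' := by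
      intro a ha
      by_cases h1 : 2 * a < cs.length - 1
      · have := H a (by omega) (by omega)
        have e : 0 + (cs.length - 1) - a = cs.length - 1 - a := by omega
        rw [e] at this
        exact this
      · by_cases h2 : 2 * a = cs.length - 1
        · have e : cs.length - 1 - a = a := by omega
          rw [e]
        · have hb : 2 * (cs.length - 1 - a) < 0 + (cs.length - 1) := by omega
          have := H (cs.length - 1 - a) (by omega) hb
          have e : 0 + (cs.length - 1) - (cs.length - 1 - a) = a := by omega
          rw [e] at this
          exact this.symm
    apply List.ext_getElem (by simp)
    intro k h1 h2
    have hk : k < cs.length := h2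
    have hk' : cs.length - 1 - k < cs.length := by omega
    rw [List.getElem_reverse, ← List.getD_eq_getElem cs ' ' hk', ← List.getD_eq_getElem cs ' ' hk]
    exact (key k hk).symm
  · intro h k _ hk2
    have hkn : k < cs.length := by omega
    have hkn' : cs.length - 1 - k < cs.length := by omega
    have hp : cs.reverse[k]'(by simpa using hkn) = cs[cs.length - 1 - k]'hkn' :=
      List.getElem_reverse _
    have hq : cs.reverse[k]'(by simpa using hkn) = cs[k]'hkn := by
      simp only [List.getElem_of_eq h]
    have e : 0 + (cs.length - 1) - k = cs.length - 1 - k := by omega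
    rw [e, List.getD_eq_getElem cs ' ' hkn, List.getD_eq_getElem cs ' ' hkn']
    rw [← hp, hq]

-- one step of B on a diagonal state (acc, acc) is one step of A, duplicated
lemma step_eq (acc : List String) (word : String) :
    stepB (acc, acc) word = (stepA acc word, stepA acc word) := by
  have hany : (acc.any fun p => p == word) = decide (word ∈ acc) := by
    simp [List.any_eq, beq_iff_eq]
  unfold stepA stepB
  simp only [pyRevA_eq, PySem.List.len_eq, Nat.one_lt_cast,
             PySem.Set.contains_eq_decide, hany, decide_eq_false_iff_not]
  by_cases hl : 1 < word.toList.length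
  · by_cases hmem : word ∈ acc
    · rw [if_neg (fun h => h.2 hmem)]
      by_cases hpal : word.toList = word.toList.reverse
      · rw [if_pos ⟨hpal, hl⟩, if_neg (not_not_intro hmem)]
      · rw [if_neg (fun h => hpal h.1)]
    · rw [if_pos ⟨hl, hmem⟩]
      by_cases hpal : word.toList = word.toList.reverse
      · have htp : twoPtr word.toList 0 (word.toList.length - 1) = true :=
          (twoPtr_palindrome word.toList).2 hpal.symm
        have hadd : PySem.Set.add acc word = acc ++ [word] := by
          simp [PySem.Set.add, hmem]
        rw [if_pos htp, if_pos ⟨hpal, hl⟩, if_pos hmem, hadd]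
      · have htp : twoPtr word.toList 0 (word.toList.length - 1) = false := by
          rw [Bool.eq_false_iff, Ne, twoPtr_palindrome]
          exact fun h => hpal h.symm
        simp only [htp, Bool.false_eq_true, if_false]
        rw [if_neg (fun h => hpal h.1)]
  · rw [if_neg (fun h => hl h.1), if_neg (fun h => hl h.2)]

-- B's fold over a diagonal initial state projects to A's fold
lemma fold_inv (words : List String) :
    ∀ acc : List String, (words.foldl stepB (acc, acc)).2 = words.foldl stepA acc := by
  induction words with
  | nil => intro acc; rfl
  | cons w ws ih =>
    intro acc
    simp only [List.foldl_cons, step_eq]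
    exact ih (stepA acc w)

-- ===== VERDICT (by name: the statement is the Claim_ definition above) =====
theorem find_palindromes_spec : Claim_equal_find_palindromes := by
  intro words _
  unfold Spec_find_palindromes find_palindromes find_palindromes_alt
  have := (fold_inv words []).symm
  simpa [PySem.Set.empty] using this
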